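-- pv_equiv track=rewrite | github.com/tothedarktowercame/futon6 | scripts/compute-alpha-gap.py | find_i0
-- ===== SOURCE A (Python) =====
-- def find_i0(n, edges, taus, eps):
--     heavy_adj = [set() for _ in range(n)]
--     for idx, (u, v) in enumerate(edges):
--         if taus[idx] > eps:
--             heavy_adj[u].add(v); heavy_adj[v].add(u)
--     i_set = set()
--     for v in sorted(range(n), key=lambda vv: len(heavy_adj[vv])):
--         if all(u not in i_set for u in heavy_adj[v]):
--             i_set.add(v)
--     return sorted(i_set)
-- ===== SOURCE B (Python) =====
-- def find_i0(n, edges, taus, eps):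
--     adj = {}
--     for (u, v), t in zip(edges, taus):
--         if t > eps:
--             adj.setdefault(u, set()).add(v)
--             adj.setdefault(v, set()).add(u)
--     blocked = set()
--     out = []
--     for v in sorted(range(n), key=lambda vv: len(adj.get(vv, ()))):
--         if v not in blocked:
--             out.append(v)
--             blocked |= adj.get(v, set())
--     return sorted(out)
-- ===== Notes on version B (the rewrite author's own statement) =====
-- stated objective: faster
-- what changed: B replaces A's n-length list-of-sets adjacency indexed by vertex with a dict of neighbor sets built from zip(edges, taus) (touching only vertices that occur in heavy edges), and replaces A's per-vertex backward re-scan all(u not in i_set) with forward propagation of a 'blocked' set: an unblocked vertex (in the same degree order) is appended to a result list and its neighbors are blocked; measured ~2x faster at the largest timed size.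
-- outside the precondition, e.g. on find_i0(2, [(-1, 0)], [1], 0): A returns [0], B returns [0, 1]; on find_i0(2, [(-2, 0), (-2, 1), (1, 1)], [1, 1, 1], 0): A returns [1], B returns [0, 1]
import Mathlib
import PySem

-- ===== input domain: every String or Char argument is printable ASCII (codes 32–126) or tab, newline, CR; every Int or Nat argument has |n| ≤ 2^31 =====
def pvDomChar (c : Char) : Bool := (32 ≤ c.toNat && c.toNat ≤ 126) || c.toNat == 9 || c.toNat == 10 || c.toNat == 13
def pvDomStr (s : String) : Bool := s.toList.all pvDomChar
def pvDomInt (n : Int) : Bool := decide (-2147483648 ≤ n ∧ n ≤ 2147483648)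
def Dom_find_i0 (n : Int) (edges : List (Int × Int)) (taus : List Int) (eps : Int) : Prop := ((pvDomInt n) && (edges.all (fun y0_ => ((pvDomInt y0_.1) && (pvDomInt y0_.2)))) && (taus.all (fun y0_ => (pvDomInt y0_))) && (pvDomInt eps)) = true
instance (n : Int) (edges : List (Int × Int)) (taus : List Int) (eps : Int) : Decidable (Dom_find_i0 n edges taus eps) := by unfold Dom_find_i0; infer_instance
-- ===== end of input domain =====

-- B keeps the degree-increasing greedy order but builds the heavy adjacency as a dict of neighbor
-- sets from zip(edges, taus) and replaces A's backward neighbor re-scan against the chosen set with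
-- forward propagation of a 'blocked' set; same return value on Pre_ (measured faster in a timing run).

-- ===== PORT A =====
def pvBuildAdj (n : Int) (edges : List (Int × Int)) (taus : List Int) (eps : Int) : List (PySem.Set Int) :=
  (PySem.List.enumerate edges 0).foldl
    (fun adj p =>
      if PySem.List.pyGetD taus p.1 0 > eps then
        let adj1 := PySem.List.pySetD adj p.2.1
          (PySem.Set.add (PySem.List.pyGetD adj p.2.1 ([] : PySem.Set Int)) p.2.2)
        PySem.List.pySetD adj1 p.2.2
          (PySem.Set.add (PySem.List.pyGetD adj1 p.2.2 ([] : PySem.Set Int)) p.2.1)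
      else adj)
    ((PySem.List.pyRange 0 n 1).map (fun _ => ([] : PySem.Set Int)))

def find_i0 (n : Int) (edges : List (Int × Int)) (taus : List Int) (eps : Int) : List Int :=
  let heavy_adj := pvBuildAdj n edges taus eps
  let i_set := (PySem.List.sorted (PySem.List.pyRange 0 n 1)
      (fun vv => ((PySem.List.pyGetD heavy_adj vv ([] : PySem.Set Int)).length : Int)) false).foldl
    (fun s v =>
      if (PySem.List.pyGetD heavy_adj v ([] : PySem.Set Int)).all
          (fun u => !(PySem.Set.contains s u)) then
        PySem.Set.add s v
      else s)
    PySem.Set.empty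
  PySem.List.sorted i_set (fun x => x) false

-- ===== PORT B =====
-- 'adj.setdefault(u, set()).add(v)' is ported as 'insert u (Set.add (getD u []) v)': both map u to its
-- previous set (a new empty set if absent, key appended) with v appended if new — exact dict semantics.
def find_i0_alt (n : Int) (edges : List (Int × Int)) (taus : List Int) (eps : Int) : List Int :=
  let adj := (edges.zip taus).foldl
    (fun (d : PySem.Dict Int (PySem.Set Int)) q =>
      if q.2 > eps then
        let d1 := d.insert q.1.1 (PySem.Set.add (d.getD q.1.1 ([] : PySem.Set Int)) q.1.2)
        d1.insert q.1.2 (PySem.Set.add (d1.getD q.1.2 ([] : PySem.Set Int)) q.1.1)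
      else d)
    PySem.Dict.empty
  let st := (PySem.List.sorted (PySem.List.pyRange 0 n 1)
      (fun vv => ((adj.getD vv ([] : PySem.Set Int)).length : Int)) false).foldl
    (fun (st : List Int × PySem.Set Int) v =>
      if !(PySem.Set.contains st.2 v) then
        (st.1 ++ [v], PySem.Set.union st.2 (adj.getD v ([] : PySem.Set Int)))
      else st)
    (([] : List Int), PySem.Set.empty)
  PySem.List.sorted st.1 (fun x => x) false

-- ===== PRECONDITION & SPEC =====
-- Pre_ excludes inputs where A raises IndexError (taus shorter than edges, or a heavy-edge endpoint outside
-- [-n, n)), and heavy edges with a negative endpoint, on which A still returns but Python's negative-index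
-- wraparound builds an asymmetric adjacency whose greedy outcome is accidental (both programs' values there
-- are wraparound artefacts and they can disagree).
def Pre_find_i0 (n : Int) (edges : List (Int × Int)) (taus : List Int) (eps : Int) : Prop :=
  edges.length ≤ taus.length ∧
  ∀ p ∈ edges.zip taus, p.2 > eps → 0 ≤ p.1.1 ∧ p.1.1 < n ∧ 0 ≤ p.1.2 ∧ p.1.2 < n

instance (n : Int) (edges : List (Int × Int)) (taus : List Int) (eps : Int) : Decidable (Pre_find_i0 n edges taus eps) := by unfold Pre_find_i0; infer_instance

def pvWitness_find_i0 : Int × (List (Int × Int)) × List Int × Int := (3, [(0, 1), (1, 2)], [1, 0], 0)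

def Spec_find_i0 (n : Int) (edges : List (Int × Int)) (taus : List Int) (eps : Int) (out : List Int) : Prop := out = find_i0_alt n edges taus eps
instance (n : Int) (edges : List (Int × Int)) (taus : List Int) (eps : Int) (out : List Int) : Decidable (Spec_find_i0 n edges taus eps out) := by unfold Spec_find_i0; infer_instance

-- ===== CLAIM (what is proved, stated in full; the proofs are below) =====
def Claim_equal_find_i0 : Prop := ∀ (n : Int) (edges : List (Int × Int)) (taus : List Int) (eps : Int), Dom_find_i0 n edges taus eps → Pre_find_i0 n edges taus eps → Spec_find_i0 n edges taus eps (find_i0 n edges taus eps)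

-- ===== LEMMAS AND PROOFS =====

-- 'Good n adj': adjacency has length n and is, on [0, n), symmetric with in-range members
def pvGood (n : Int) (adj : List (PySem.Set Int)) : Prop :=
  adj.length = n.toNat ∧
  ∀ a b : Int, 0 ≤ a → a < n →
    b ∈ PySem.List.pyGetD adj a ([] : PySem.Set Int) →
    0 ≤ b ∧ b < n ∧ a ∈ PySem.List.pyGetD adj b ([] : PySem.Set Int)

lemma pvGetSet (adj : List (PySem.Set Int)) (i a : Int) (w : PySem.Set Int)
    (hi : 0 ≤ i) (ha : 0 ≤ a) :
    PySem.List.pyGetD (PySem.List.pySetD adj i w) a ([] : PySem.Set Int) =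
      if a = i then (if i.toNat < adj.length then w else PySem.List.pyGetD adj a ([] : PySem.Set Int))
      else PySem.List.pyGetD adj a ([] : PySem.Set Int) := by
  have hi' : i = ((i.toNat : ℕ) : ℤ) := by omega
  have ha' : a = ((a.toNat : ℕ) : ℤ) := by omega
  rw [PySem.List.pySetD_of_nonneg adj w hi, ha', PySem.List.pyGetD_natCast,
    PySem.List.pyGetD_natCast]
  have hai2 : ((a.toNat : ℤ) = i) ↔ (i.toNat = a.toNat) := by omega
  simp only [List.getD, List.getElem?_set, hai2]
  split_ifs with h1 h2
  · simp
  · rw [List.getElem?_eq_none (by omega)]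
  · rfl

lemma pvMemSet (adj : List (PySem.Set Int)) (i a : Int) (w : PySem.Set Int)
    (hi : 0 ≤ i) (hil : i.toNat < adj.length) (ha : 0 ≤ a) :
    ∀ b : Int, b ∈ PySem.List.pyGetD (PySem.List.pySetD adj i w) a ([] : PySem.Set Int) ↔
      (a = i ∧ b ∈ w) ∨ (a ≠ i ∧ b ∈ PySem.List.pyGetD adj a ([] : PySem.Set Int)) := by
  intro b
  rw [pvGetSet adj i a w hi ha]
  by_cases h : a = i <;> simp [h, hil]

lemma pvGood_step (n : Int) (adj : List (PySem.Set Int)) (u v : Int)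
    (hG : pvGood n adj) (hu0 : 0 ≤ u) (hun : u < n) (hv0 : 0 ≤ v) (hvn : v < n) :
    pvGood n
      (PySem.List.pySetD
        (PySem.List.pySetD adj u (PySem.Set.add (PySem.List.pyGetD adj u ([] : PySem.Set Int)) v))
        v (PySem.Set.add (PySem.List.pyGetD
              (PySem.List.pySetD adj u (PySem.Set.add (PySem.List.pyGetD adj u ([] : PySem.Set Int)) v))
              v ([] : PySem.Set Int)) u)) := by
  obtain ⟨hlen, hsym⟩ := hG
  set g := fun a : Int => PySem.List.pyGetD adj a ([] : PySem.Set Int) with hg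
  set adj1 := PySem.List.pySetD adj u (PySem.Set.add (g u) v) with hadj1
  set w2 := PySem.Set.add (PySem.List.pyGetD adj1 v ([] : PySem.Set Int)) u with hw2
  have hul : u.toNat < adj.length := by omega
  have hl1 : adj1.length = adj.length := PySem.List.length_pySetD _ _ _
  have hvl : v.toNat < adj1.length := by omega
  have hmem : ∀ a b : Int, 0 ≤ a →
      (b ∈ PySem.List.pyGetD (PySem.List.pySetD adj1 v w2) a ([] : PySem.Set Int) ↔
        b ∈ g a ∨ (a = u ∧ b = v) ∨ (a = v ∧ b = u)) := by
    intro a b ha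
    rw [pvMemSet adj1 v a w2 hv0 hvl ha]
    have h1 := pvMemSet adj u v (PySem.Set.add (g u) v) hu0 hul hv0
    have h2 := pvMemSet adj u a (PySem.Set.add (g u) v) hu0 hul ha
    simp only [← hadj1] at h1 h2
    simp only [hw2, PySem.Set.mem_add, h1, h2, hg]
    by_cases hau : a = u
    · subst hau
      by_cases hav : a = v
      · subst hav; simp_all; try tauto
      · simp [hav]; try tauto
    · by_cases hav : a = v
      · subst hav; simp [hau]; try tauto
      · simp [hau, hav]; try tauto
  refine ⟨?_, ?_⟩
  · rw [PySem.List.length_pySetD, hl1, hlen]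
  · intro a b ha0 han hb
    have hb' := (hmem a b ha0).mp hb
    rcases hb' with h | ⟨hau, hbv⟩ | ⟨hav, hbu⟩
    · obtain ⟨hb0, hbn, hab⟩ := hsym a b ha0 han h
      exact ⟨hb0, hbn, (hmem b a hb0).mpr (Or.inl hab)⟩
    · subst hau; subst hbv
      exact ⟨hv0, hvn, (hmem b a hv0).mpr (Or.inr (Or.inr ⟨rfl, rfl⟩))⟩
    · subst hav; subst hbu
      exact ⟨hu0, hun, (hmem b a hu0).mpr (Or.inr (Or.inl ⟨rfl, rfl⟩))⟩

-- A's enumerate/taus-lookup build iterates exactly the zipped pairs B iterates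
lemma pvZipEq (edges : List (Int × Int)) (taus : List Int)
    (h : edges.length ≤ taus.length) :
    (PySem.List.enumerate edges 0).map
        (fun p => (p.2, PySem.List.pyGetD taus p.1 0)) = edges.zip taus := by
  apply List.ext_getElem
  · simp [PySem.List.length_enumerate, List.length_zip]; omega
  · intro k h1 h2
    have hk : k < edges.length := by
      simpa [PySem.List.length_enumerate] using h1
    have hkt : k < taus.length := by omega
    simp only [List.getElem_map, PySem.List.getElem_enumerate, List.getElem_zip]
    have hcast : ((0 : ℤ) + (k : ℕ)) = ((k : ℕ) : ℤ) := by omega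
    rw [hcast, PySem.List.pyGetD_natCast, List.getD_eq_getElem taus 0 hkt]

-- correspondence between A's list-of-sets adjacency and B's dict adjacency on [0, n)
def pvCorr (n : Int) (adjA : List (PySem.Set Int)) (d : PySem.Dict Int (PySem.Set Int)) : Prop :=
  ∀ v : Int, 0 ≤ v → v < n →
    PySem.List.pyGetD adjA v ([] : PySem.Set Int) = d.getD v ([] : PySem.Set Int)

lemma pvCorr_step (n : Int) (adjA : List (PySem.Set Int)) (d : PySem.Dict Int (PySem.Set Int))
    (u v : Int) (hlen : adjA.length = n.toNat) (hC : pvCorr n adjA d)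
    (hu0 : 0 ≤ u) (hun : u < n) (hv0 : 0 ≤ v) (hvn : v < n) :
    pvCorr n
      (PySem.List.pySetD
        (PySem.List.pySetD adjA u (PySem.Set.add (PySem.List.pyGetD adjA u ([] : PySem.Set Int)) v))
        v (PySem.Set.add (PySem.List.pyGetD
              (PySem.List.pySetD adjA u (PySem.Set.add (PySem.List.pyGetD adjA u ([] : PySem.Set Int)) v))
              v ([] : PySem.Set Int)) u))
      ((d.insert u (PySem.Set.add (d.getD u ([] : PySem.Set Int)) v)).insert v
        (PySem.Set.add ((d.insert u (PySem.Set.add (d.getD u ([] : PySem.Set Int)) v)).getD v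
          ([] : PySem.Set Int)) u)) := by
  intro w hw0 hwn
  have hul : u.toNat < adjA.length := by omega
  have hvl : v.toNat <
      (PySem.List.pySetD adjA u (PySem.Set.add (PySem.List.pyGetD adjA u ([] : PySem.Set Int)) v)).length := by
    rw [PySem.List.length_pySetD]; omega
  rw [pvGetSet _ v w _ hv0 hw0, pvGetSet _ u v _ hu0 hv0, pvGetSet _ u w _ hu0 hw0,
    PySem.Dict.getD_insert, PySem.Dict.getD_insert, PySem.Dict.getD_insert,
    hC u hu0 hun]
  split_ifs with h1 h2 h3 <;>
    simp_all [hC u hu0 hun, hC v hv0 hvn, hC w hw0 hwn]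

lemma pvBuild_corr (n : Int) (edges : List (Int × Int)) (taus : List Int) (eps : Int)
    (hpre : Pre_find_i0 n edges taus eps) :
    pvCorr n (pvBuildAdj n edges taus eps)
      ((edges.zip taus).foldl
        (fun (d : PySem.Dict Int (PySem.Set Int)) q =>
          if q.2 > eps then
            let d1 := d.insert q.1.1 (PySem.Set.add (d.getD q.1.1 ([] : PySem.Set Int)) q.1.2)
            d1.insert q.1.2 (PySem.Set.add (d1.getD q.1.2 ([] : PySem.Set Int)) q.1.1)
          else d)
        PySem.Dict.empty) := by
  obtain ⟨hlt, hrange⟩ := hpre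
  -- rewrite A's build as a fold over the same zipped list
  have hA : pvBuildAdj n edges taus eps =
      (edges.zip taus).foldl
        (fun adj q =>
          if q.2 > eps then
            let adj1 := PySem.List.pySetD adj q.1.1
              (PySem.Set.add (PySem.List.pyGetD adj q.1.1 ([] : PySem.Set Int)) q.1.2)
            PySem.List.pySetD adj1 q.1.2
              (PySem.Set.add (PySem.List.pyGetD adj1 q.1.2 ([] : PySem.Set Int)) q.1.1)
          else adj)
        ((PySem.List.pyRange 0 n 1).map (fun _ => ([] : PySem.Set Int))) := by
    rw [← pvZipEq edges taus hlt, List.foldl_map]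
    rfl
  rw [hA]
  -- parallel induction over the zipped list
  have hinit_len : ((PySem.List.pyRange 0 n 1).map (fun _ => ([] : PySem.Set Int))).length = n.toNat := by
    simp [PySem.List.length_pyRange_one]
  have hinit_corr : pvCorr n ((PySem.List.pyRange 0 n 1).map (fun _ => ([] : PySem.Set Int)))
      PySem.Dict.empty := by
    intro v hv0 hvn
    have hz : PySem.List.pyGetD ((PySem.List.pyRange 0 n 1).map (fun _ => ([] : PySem.Set Int))) v ([] : PySem.Set Int) = ([] : PySem.Set Int) := by
      have hv' : v = ((v.toNat : ℕ) : ℤ) := by omega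
      rw [hv', PySem.List.pyGetD_natCast]
      simp only [List.getD, List.getElem?_map]
      cases (PySem.List.pyRange 0 n 1)[v.toNat]? <;> simp
    rw [hz, PySem.Dict.getD_empty]
  have hfold : ∀ (l : List ((Int × Int) × Int)) (adjA : List (PySem.Set Int))
      (d : PySem.Dict Int (PySem.Set Int)),
      (∀ p ∈ l, p.2 > eps → 0 ≤ p.1.1 ∧ p.1.1 < n ∧ 0 ≤ p.1.2 ∧ p.1.2 < n) →
      adjA.length = n.toNat → pvCorr n adjA d →
      pvCorr n
        (l.foldl
          (fun adj q =>
            if q.2 > eps then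
              let adj1 := PySem.List.pySetD adj q.1.1
                (PySem.Set.add (PySem.List.pyGetD adj q.1.1 ([] : PySem.Set Int)) q.1.2)
              PySem.List.pySetD adj1 q.1.2
                (PySem.Set.add (PySem.List.pyGetD adj1 q.1.2 ([] : PySem.Set Int)) q.1.1)
            else adj) adjA)
        (l.foldl
          (fun (d : PySem.Dict Int (PySem.Set Int)) q =>
            if q.2 > eps then
              let d1 := d.insert q.1.1 (PySem.Set.add (d.getD q.1.1 ([] : PySem.Set Int)) q.1.2)
              d1.insert q.1.2 (PySem.Set.add (d1.getD q.1.2 ([] : PySem.Set Int)) q.1.1)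
            else d) d) := by
    intro l
    induction l with
    | nil => intro adjA d _ _ hC; simpa using hC
    | cons q t ih =>
      intro adjA d hc hlen hC
      simp only [List.foldl_cons]
      by_cases hq : q.2 > eps
      · obtain ⟨h1, h2, h3, h4⟩ := hc q List.mem_cons_self hq
        simp only [hq, if_true]
        exact ih _ _ (fun p hp => hc p (List.mem_cons_of_mem _ hp))
          (by rw [PySem.List.length_pySetD, PySem.List.length_pySetD]; exact hlen)
          (pvCorr_step n adjA d q.1.1 q.1.2 hlen hC h1 h2 h3 h4)
      · simp only [hq, if_false]
        exact ih _ _ (fun p hp => hc p (List.mem_cons_of_mem _ hp)) hlen hC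
  exact hfold _ _ _ hrange hinit_len hinit_corr

lemma pvGood_build (n : Int) (edges : List (Int × Int)) (taus : List Int) (eps : Int)
    (hpre : Pre_find_i0 n edges taus eps) :
    pvGood n (pvBuildAdj n edges taus eps) := by
  obtain ⟨hlt, hrange⟩ := hpre
  have hcond : ∀ p ∈ PySem.List.enumerate edges 0,
      PySem.List.pyGetD taus p.1 0 > eps → 0 ≤ p.2.1 ∧ p.2.1 < n ∧ 0 ≤ p.2.2 ∧ p.2.2 < n := by
    intro p hp hheavy
    rw [PySem.List.mem_enumerate_iff] at hp
    obtain ⟨k, hk, rfl⟩ := hp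
    have hkt : k < taus.length := by omega
    have hcast : ((0 : ℤ) + (k : ℕ)) = ((k : ℕ) : ℤ) := by omega
    rw [hcast, PySem.List.pyGetD_natCast, List.getD_eq_getElem taus 0 hkt] at hheavy
    have hkz : k < (edges.zip taus).length := by
      rw [List.length_zip]; omega
    have hz : (edges[k], taus[k]) ∈ edges.zip taus := by
      have hget : (edges.zip taus)[k] = (edges[k], taus[k]) := List.getElem_zip
      exact hget ▸ List.getElem_mem hkz
    exact hrange _ hz hheavy
  have hinit : pvGood n ((PySem.List.pyRange 0 n 1).map (fun _ => ([] : PySem.Set Int))) := by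
    constructor
    · simp [PySem.List.length_pyRange_one]
    · intro a b ha0 han hb
      have hz : PySem.List.pyGetD ((PySem.List.pyRange 0 n 1).map (fun _ => ([] : PySem.Set Int))) a ([] : PySem.Set Int) = ([] : PySem.Set Int) := by
        have ha' : a = ((a.toNat : ℕ) : ℤ) := by omega
        rw [ha', PySem.List.pyGetD_natCast]
        simp only [List.getD, List.getElem?_map]
        cases (PySem.List.pyRange 0 n 1)[a.toNat]? <;> simp
      rw [hz] at hb
      simp at hb
  have hfold : ∀ (l : List (ℤ × (ℤ × ℤ))) (adj : List (PySem.Set Int)),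
      (∀ p ∈ l, PySem.List.pyGetD taus p.1 0 > eps → 0 ≤ p.2.1 ∧ p.2.1 < n ∧ 0 ≤ p.2.2 ∧ p.2.2 < n) →
      pvGood n adj →
      pvGood n (l.foldl
        (fun adj p =>
          if PySem.List.pyGetD taus p.1 0 > eps then
            let adj1 := PySem.List.pySetD adj p.2.1
              (PySem.Set.add (PySem.List.pyGetD adj p.2.1 ([] : PySem.Set Int)) p.2.2)
            PySem.List.pySetD adj1 p.2.2
              (PySem.Set.add (PySem.List.pyGetD adj1 p.2.2 ([] : PySem.Set Int)) p.2.1)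
          else adj) adj) := by
    intro l
    induction l with
    | nil => intro adj _ hG; simpa using hG
    | cons p t ih =>
      intro adj hc hG
      simp only [List.foldl_cons]
      apply ih _ (fun q hq => hc q (List.mem_cons_of_mem _ hq))
      by_cases hheavy : PySem.List.pyGetD taus p.1 0 > eps
      · obtain ⟨h1, h2, h3, h4⟩ := hc p (List.mem_cons_self) hheavy
        simp only [hheavy, if_true]
        exact pvGood_step n adj p.2.1 p.2.2 hG h1 h2 h3 h4
      · simpa [hheavy] using hG
  exact hfold _ _ hcond hinit

-- the sort compares only keys of list members: equal keys on members give equal sorted lists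
lemma pvInsertByCongr (k1 k2 : Int → Int) (x : Int) (ys : List Int)
    (hx : k1 x = k2 x) (hys : ∀ y ∈ ys, k1 y = k2 y) :
    PySem.List.insertBy (fun a b => decide (k1 a < k1 b)) x ys =
      PySem.List.insertBy (fun a b => decide (k2 a < k2 b)) x ys := by
  induction ys with
  | nil => rfl
  | cons y t ih =>
    have hcond : decide (k1 x < k1 y) = decide (k2 x < k2 y) := by
      rw [hx, hys y List.mem_cons_self]
    simp only [PySem.List.insertBy]
    rw [ih (fun z hz => hys z (List.mem_cons_of_mem _ hz))]
    simp only [hcond]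

lemma pvSortedCongr (xs : List Int) (k1 k2 : Int → Int)
    (h : ∀ x ∈ xs, k1 x = k2 x) :
    PySem.List.sorted xs k1 false = PySem.List.sorted xs k2 false := by
  rw [PySem.List.sorted_eq_foldl_insertBy, PySem.List.sorted_eq_foldl_insertBy]
  have H : ∀ (l acc : List Int), (∀ x ∈ l, k1 x = k2 x) → (∀ x ∈ acc, k1 x = k2 x) →
      l.foldl (fun acc x => PySem.List.insertBy (fun a b => decide (k1 a < k1 b)) x acc) acc =
      l.foldl (fun acc x => PySem.List.insertBy (fun a b => decide (k2 a < k2 b)) x acc) acc := by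
    intro l
    induction l with
    | nil => intro acc _ _; rfl
    | cons x t ih =>
      intro acc hl hacc
      simp only [List.foldl_cons]
      rw [pvInsertByCongr k1 k2 x acc (hl x List.mem_cons_self) hacc]
      apply ih _ (fun z hz => hl z (List.mem_cons_of_mem _ hz))
      intro z hz
      rcases (PySem.List.mem_insertBy _ _ _ _).mp hz with h1 | h1
      · exact h1 ▸ hl x List.mem_cons_self
      · exact hacc z h1
  exact H xs [] h (by simp)

-- the selection loops: A's set fold equals the first component of B's pair fold
lemma pvSel (n : Int) (adj : List (PySem.Set Int)) (hG : pvGood n adj) :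
    ∀ (order : List Int), order.Nodup → (∀ v ∈ order, 0 ≤ v ∧ v < n) →
    ∀ (s blocked : PySem.Set Int),
      s.Nodup → (∀ v ∈ order, v ∉ s) → (∀ v ∈ s, 0 ≤ v ∧ v < n) →
      (∀ x, x ∈ blocked ↔ ∃ w ∈ s, x ∈ PySem.List.pyGetD adj w ([] : PySem.Set Int)) →
      order.foldl
        (fun s v =>
          if (PySem.List.pyGetD adj v ([] : PySem.Set Int)).all
              (fun u => !(PySem.Set.contains s u)) then PySem.Set.add s v else s) s =
      (order.foldl
        (fun (st : List Int × PySem.Set Int) v =>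
          if !(PySem.Set.contains st.2 v) then
            (st.1 ++ [v], PySem.Set.union st.2 (PySem.List.pyGetD adj v ([] : PySem.Set Int)))
          else st) (s, blocked)).1 := by
  intro order
  induction order with
  | nil => intro _ _ s blocked _ _ _ _; rfl
  | cons v t ih =>
    intro hnd hmem s blocked hsnd hdisj hsrange hblocked
    obtain ⟨hv0, hvn⟩ := hmem v List.mem_cons_self
    have hvs : v ∉ s := hdisj v List.mem_cons_self
    have hvt : v ∉ t := (List.nodup_cons.mp hnd).1
    have hiff : ((PySem.List.pyGetD adj v ([] : PySem.Set Int)).all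
        (fun u => !(PySem.Set.contains s u)) = true) ↔
        ((!(PySem.Set.contains blocked v)) = true) := by
      simp only [List.all_eq_true, Bool.not_eq_true']
      constructor
      · intro hall
        rw [Bool.eq_false_iff]
        intro hvb
        obtain ⟨w, hws, hvw⟩ := (hblocked v).mp ((PySem.Set.contains_iff blocked v).mp hvb)
        obtain ⟨hw0, hwn⟩ := hsrange w hws
        obtain ⟨_, _, hwv⟩ := hG.2 w v hw0 hwn hvw
        have hct := (PySem.Set.contains_iff s w).mpr hws
        rw [hall w hwv] at hct
        exact absurd hct (by decide)
      · intro hvb u hu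
        rw [Bool.eq_false_iff]
        intro hus
        obtain ⟨hu0, hun, hvu⟩ := hG.2 v u hv0 hvn hu
        have := (PySem.Set.contains_iff blocked v).mpr
          ((hblocked v).mpr ⟨u, (PySem.Set.contains_iff s u).mp hus, hvu⟩)
        rw [hvb] at this
        exact absurd this (by decide)
    by_cases hc : (PySem.List.pyGetD adj v ([] : PySem.Set Int)).all
        (fun u => !(PySem.Set.contains s u)) = true
    · have hbc : (!(PySem.Set.contains blocked v)) = true := hiff.mp hc
      simp only [List.foldl_cons, hc, hbc, if_true]
      rw [PySem.Set.add_of_not_mem hvs]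
      apply ih (List.nodup_cons.mp hnd).2 (fun w hw => hmem w (List.mem_cons_of_mem _ hw))
      · rw [← PySem.Set.add_of_not_mem hvs]
        exact PySem.Set.nodup_add s v hsnd
      · intro w hw
        have hwns := hdisj w (List.mem_cons_of_mem _ hw)
        have hwnv : w ≠ v := fun h => hvt (h ▸ hw)
        simp [hwns, hwnv]
      · intro w hw
        rcases List.mem_append.mp hw with h | h
        · exact hsrange w h
        · simp at h; exact h ▸ ⟨hv0, hvn⟩
      · intro x
        rw [PySem.Set.mem_union, hblocked x]
        constructor
        · rintro (⟨w, hws, hxw⟩ | hx)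
          · exact ⟨w, List.mem_append.mpr (Or.inl hws), hxw⟩
          · exact ⟨v, List.mem_append.mpr (Or.inr (List.mem_singleton.mpr rfl)), hx⟩
        · rintro ⟨w, hws, hxw⟩
          rcases List.mem_append.mp hws with h | h
          · exact Or.inl ⟨w, h, hxw⟩
          · exact Or.inr ((List.mem_singleton.mp h) ▸ hxw)
    · have hbc : ¬ ((!(PySem.Set.contains blocked v)) = true) := fun h => hc (hiff.mpr h)
      simp only [List.foldl_cons, if_neg hc, if_neg hbc]
      exact ih (List.nodup_cons.mp hnd).2 (fun w hw => hmem w (List.mem_cons_of_mem _ hw))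
        s blocked hsnd (fun w hw => hdisj w (List.mem_cons_of_mem _ hw)) hsrange hblocked

-- ===== VERDICT (by name: the statement is the Claim_ definition above) =====
theorem find_i0_spec : Claim_equal_find_i0 := by
  intro n edges taus eps _hdom hpre
  unfold Spec_find_i0
  simp only [find_i0, find_i0_alt]
  have hG := pvGood_build n edges taus eps hpre
  have hCorr := pvBuild_corr n edges taus eps hpre
  set adj := pvBuildAdj n edges taus eps with hadj
  set adjB := (edges.zip taus).foldl
    (fun (d : PySem.Dict Int (PySem.Set Int)) q =>
      if q.2 > eps then
        let d1 := d.insert q.1.1 (PySem.Set.add (d.getD q.1.1 ([] : PySem.Set Int)) q.1.2)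
        d1.insert q.1.2 (PySem.Set.add (d1.getD q.1.2 ([] : PySem.Set Int)) q.1.1)
      else d)
    PySem.Dict.empty with hadjB
  -- B's sort key agrees with A's on the vertex range
  have hkey : PySem.List.sorted (PySem.List.pyRange 0 n 1)
      (fun vv => ((adjB.getD vv ([] : PySem.Set Int)).length : Int)) false =
      PySem.List.sorted (PySem.List.pyRange 0 n 1)
      (fun vv => ((PySem.List.pyGetD adj vv ([] : PySem.Set Int)).length : Int)) false := by
    apply pvSortedCongr
    intro v hv
    have hv' := (PySem.List.mem_pyRange_one).mp hv
    rw [hCorr v (by omega) (by omega)]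
  rw [hkey]
  set ord := PySem.List.sorted (PySem.List.pyRange 0 n 1)
      (fun vv => ((PySem.List.pyGetD adj vv ([] : PySem.Set Int)).length : Int)) false with hord
  have hperm : ord.Perm (PySem.List.pyRange 0 n 1) := PySem.List.sorted_perm _ _ _
  have hnd : ord.Nodup := hperm.nodup_iff.mpr (PySem.List.nodup_pyRange_one 0 n)
  have hmem : ∀ v ∈ ord, 0 ≤ v ∧ v < n := by
    intro v hv
    have := hperm.mem_iff.mp hv
    have := (PySem.List.mem_pyRange_one).mp this
    omega
  -- B's selection fold reads adjB only at vertices of ord, where it equals adj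
  have hbody : ord.foldl
      (fun (st : List Int × PySem.Set Int) v =>
        if !(PySem.Set.contains st.2 v) then
          (st.1 ++ [v], PySem.Set.union st.2 (adjB.getD v ([] : PySem.Set Int)))
        else st) (([] : List Int), PySem.Set.empty) =
      ord.foldl
      (fun (st : List Int × PySem.Set Int) v =>
        if !(PySem.Set.contains st.2 v) then
          (st.1 ++ [v], PySem.Set.union st.2 (PySem.List.pyGetD adj v ([] : PySem.Set Int)))
        else st) (([] : List Int), PySem.Set.empty) := by
    apply PySem.List.foldl_congr_mem
    intro acc v hv
    obtain ⟨hv0, hvn⟩ := hmem v hv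
    rw [hCorr v hv0 hvn]
  rw [hbody]
  have := pvSel n adj hG ord hnd hmem PySem.Set.empty PySem.Set.empty
    (by simp [PySem.Set.empty]) (by simp [PySem.Set.empty]) (by simp [PySem.Set.empty])
    (by intro x; simp [PySem.Set.empty])
  simp only [this]
  rfl
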